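-- pv_equiv track=rewrite | github.com/linroger/FinanceCompendium | scripts/extract_latex_equations.py | extract_block_equations
-- ===== SOURCE A (Python) =====
-- from typing import List, Tuple, Dict
--
-- def extract_block_equations(content: str) -> List[Tuple[int, int, str]]:
--     """
--     Extract all block equations ($$...$$) from the content.
--
--     Returns list of (start_line, end_line, equation_content) tuples.
--     """
--     equations = []
--     lines = content.split('\n')
--
--     in_equation = False
--     equation_start = 0
--     equation_lines = []
--
--     for i, line in enumerate(lines, start=1):
--         stripped = line.strip()
--
--         if stripped == '$$' and not in_equation:
--             # Start of equation block
--             in_equation = True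
--             equation_start = i
--             equation_lines = []
--         elif stripped == '$$' and in_equation:
--             # End of equation block
--             in_equation = False
--             equation_content = '\n'.join(equation_lines)
--             equations.append((equation_start, i, equation_content))
--         elif in_equation:
--             equation_lines.append(line)
--         elif stripped.startswith('$$') and stripped.endswith('$$') and len(stripped) > 4:
--             # Single-line block equation: $$ content $$
--             equation_content = stripped[2:-2].strip()
--             equations.append((i, i, equation_content))
--
--     return equations
-- ===== SOURCE B (Python) =====
-- def extract_block_equations(content):
--     """
--     Extract all block equations ($$...$$) from the content.
--
--     Returns list of (start_line, end_line, equation_content) tuples.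
--     """
--     lines = content.split('\n')
--     n = len(lines)
--     out = []
--     i = 0  # 0-based cursor; emitted line numbers are 1-based
--     while i < n:
--         s = lines[i].strip()
--         if s == '$$':
--             # scan forward for the closing '$$'
--             j = i + 1
--             while j < n and lines[j].strip() != '$$':
--                 j += 1
--             if j == n:
--                 break  # unterminated block: emit nothing, stop
--             out.append((i + 1, j + 1, '\n'.join(lines[i + 1:j])))
--             i = j + 1
--         elif s.startswith('$$') and s.endswith('$$') and len(s) > 4:
--             out.append((i + 1, i + 1, s[2:-2].strip()))
--             i += 1
--         else:
--             i += 1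
--     return out
-- ===== Notes on version B (the rewrite author's own statement) =====
-- stated objective: alternative
-- what changed: Replaces A's single pass with an in_equation flag and accumulated equation_lines state by an explicit index-cursor while loop that, on an opener line, runs an inner forward scan to the matching closer and emits the joined slice directly, jumping the cursor past the block.
import Mathlib
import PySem

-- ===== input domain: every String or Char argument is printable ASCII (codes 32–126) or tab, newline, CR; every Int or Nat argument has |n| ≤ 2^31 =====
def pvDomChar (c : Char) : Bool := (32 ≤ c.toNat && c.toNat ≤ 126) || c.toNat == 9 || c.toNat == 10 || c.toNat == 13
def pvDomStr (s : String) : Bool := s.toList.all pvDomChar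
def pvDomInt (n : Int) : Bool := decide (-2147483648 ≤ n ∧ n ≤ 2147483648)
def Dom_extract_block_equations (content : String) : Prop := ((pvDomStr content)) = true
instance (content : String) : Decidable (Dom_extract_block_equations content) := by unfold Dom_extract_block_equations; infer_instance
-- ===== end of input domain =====

-- B replaces A's single pass carrying an in_equation flag and accumulated equation_lines by an
-- explicit cursor loop with an inner forward scan to the closing '$$' (objective: alternative decomposition).

-- ===== PORT A =====
-- one step of A's for-loop; state = (in_equation, equation_start, equation_lines, equations)
def aStep (st : Bool × Int × List String × List (Int × Int × String)) (p : Int × String) :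
    Bool × Int × List String × List (Int × Int × String) :=
  let i := p.1
  let line := p.2
  let stripped := PySem.Str.strip line
  let inEq := st.1
  let start := st.2.1
  let eqlines := st.2.2.1
  let eqs := st.2.2.2
  if stripped = "$$" ∧ inEq = false then
    (true, i, [], eqs)
  else if stripped = "$$" ∧ inEq = true then
    (false, start, eqlines, eqs ++ [(start, i, PySem.Str.join "\n" eqlines)])
  else if inEq = true then
    (inEq, start, eqlines ++ [line], eqs)
  else if PySem.Str.startswith stripped "$$" = true ∧ PySem.Str.endswith stripped "$$" = true
          ∧ PySem.Str.len stripped > 4 then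
    (inEq, start, eqlines, eqs ++ [(i, i, PySem.Str.strip (PySem.Str.slice stripped (some 2) (some (-2))))])
  else st

def extract_block_equations (content : String) : List (Int × Int × String) :=
  let lines := (PySem.Str.split? content "\n").getD []   -- content.split('\n'); sep ≠ "" so never none
  ((PySem.List.enumerate lines 1).foldl aStep (false, 0, [], [])).2.2.2

-- ===== PORT B =====
-- Source B's inner while loop: offset of the first line whose strip is '$$', if any
def bScan : List String → Option Nat
  | [] => none
  | l :: rest => if PySem.Str.strip l = "$$" then some 0 else (bScan rest).map (· + 1)

-- Source B's outer while loop; i is the 1-based line number of the head of the remaining lines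
def bLoop : List String → Int → List (Int × Int × String)
  | [], _ => []
  | l :: rest, i =>
    let s := PySem.Str.strip l
    if s = "$$" then
      match bScan rest with
      | some k =>
          (i, i + 1 + (k : Int), PySem.Str.join "\n" (rest.take k))
            :: bLoop (rest.drop (k + 1)) (i + (k : Int) + 2)
      | none => []
    else if PySem.Str.startswith s "$$" = true ∧ PySem.Str.endswith s "$$" = true
            ∧ PySem.Str.len s > 4 then
      (i, i, PySem.Str.strip (PySem.Str.slice s (some 2) (some (-2)))) :: bLoop rest (i + 1)
    else bLoop rest (i + 1)
termination_by l => l.length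
decreasing_by
  all_goals simp only [List.length_drop, List.length_cons]; omega

def extract_block_equations_alt (content : String) : List (Int × Int × String) :=
  bLoop ((PySem.Str.split? content "\n").getD []) 1

-- ===== PRECONDITION & SPEC =====
def Spec_extract_block_equations (content : String) (out : List (Int × Int × String)) : Prop := out = extract_block_equations_alt content
instance (content : String) (out : List (Int × Int × String)) : Decidable (Spec_extract_block_equations content out) := by unfold Spec_extract_block_equations; infer_instance

-- ===== CLAIM (what is proved, stated in full; the proofs are below) =====
def Claim_equal_extract_block_equations : Prop := ∀ (content : String), Dom_extract_block_equations content → Spec_extract_block_equations content (extract_block_equations content)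

-- ===== LEMMAS AND PROOFS =====

-- A's fold while in_equation = true, described by B's forward scan
theorem foldl_aStep_inEq (lines : List String) :
    ∀ (i start : Int) (eqlines : List String) (eqs : List (Int × Int × String)),
    (PySem.List.enumerate lines i).foldl aStep (true, start, eqlines, eqs) =
      match bScan lines with
      | none => (true, start, eqlines ++ lines, eqs)
      | some k =>
          (PySem.List.enumerate (lines.drop (k + 1)) (i + (k : Int) + 1)).foldl aStep
            (false, start, eqlines ++ lines.take k,
             eqs ++ [(start, i + (k : Int), PySem.Str.join "\n" (eqlines ++ lines.take k))]) := by
  induction lines with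
  | nil => intro i start eqlines eqs; simp [bScan, PySem.List.enumerate_nil]
  | cons l rest ih =>
    intro i start eqlines eqs
    by_cases h : PySem.Str.strip l = "$$"
    · simp [bScan, h, PySem.List.enumerate_cons, aStep]
    · simp only [bScan, h, if_false, PySem.List.enumerate_cons, List.foldl_cons]
      have hstep : aStep (true, start, eqlines, eqs) (i, l) = (true, start, eqlines ++ [l], eqs) := by
        simp [aStep, h]
      rw [hstep, ih (i + 1)]
      cases hb : bScan rest with
      | none => simp
      | some k =>
        simp only [Option.map_some]
        have h1 : i + 1 + (k : Int) + 1 = i + ((k : Int) + 1) + 1 := by ring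
        have h2 : i + 1 + (k : Int) = i + ((k : Int) + 1) := by ring
        simp [h2, List.append_assoc]

-- A's fold while in_equation = false computes B's loop
theorem foldl_aStep_main : ∀ (n : Nat) (lines : List String), lines.length ≤ n →
    ∀ (i start : Int) (eqlines : List String) (eqs : List (Int × Int × String)),
    ((PySem.List.enumerate lines i).foldl aStep (false, start, eqlines, eqs)).2.2.2 =
      eqs ++ bLoop lines i := by
  intro n
  induction n with
  | zero =>
    intro lines hlen i start eqlines eqs
    have : lines = [] := List.eq_nil_of_length_eq_zero (Nat.le_zero.mp hlen)
    subst this; simp [bLoop, PySem.List.enumerate_nil]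
  | succ n ih =>
    intro lines hlen i start eqlines eqs
    match lines with
    | [] => simp [bLoop, PySem.List.enumerate_nil]
    | l :: rest =>
      simp only [PySem.List.enumerate_cons, List.foldl_cons]
      by_cases h : PySem.Str.strip l = "$$"
      · have hstep : aStep (false, start, eqlines, eqs) (i, l) = (true, i, [], eqs) := by
          simp [aStep, h]
        rw [hstep, foldl_aStep_inEq]
        cases hb : bScan rest with
        | none => simp [bLoop, h, hb]
        | some k =>
          have hk : (rest.drop (k + 1)).length ≤ n := by
            have := List.length_cons (a := l) (as := rest) ▸ hlen
            simp only [List.length_drop]; omega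
          rw [ih _ hk]
          simp only [bLoop, h, if_true, hb]
          have h1 : i + 1 + (k : Int) + 1 = i + (k : Int) + 2 := by ring
          have h2 : i + 1 + (k : Int) = i + 1 + (k : Int) := rfl
          simp [h1]
      · have hlen' : rest.length ≤ n := by
          have := List.length_cons (a := l) (as := rest) ▸ hlen; omega
        by_cases h2 : PySem.Str.startswith (PySem.Str.strip l) "$$" = true
            ∧ PySem.Str.endswith (PySem.Str.strip l) "$$" = true
            ∧ PySem.Str.len (PySem.Str.strip l) > 4
        all_goals simp at h2
        · have hstep : aStep (false, start, eqlines, eqs) (i, l) =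
              (false, start, eqlines,
               eqs ++ [(i, i, PySem.Str.strip (PySem.Str.slice (PySem.Str.strip l) (some 2) (some (-2))))]) := by
            simp [aStep, h, h2]
          rw [hstep, ih _ hlen']
          simp [bLoop, h, h2]
        · have hstep : aStep (false, start, eqlines, eqs) (i, l) = (false, start, eqlines, eqs) := by
            simp only [aStep]
            simp [h]
            exact h2
          rw [hstep, ih _ hlen']
          simp [bLoop, h]
          exact h2

-- ===== VERDICT (by name: the statement is the Claim_ definition above) =====
theorem extract_block_equations_spec : Claim_equal_extract_block_equations := by
  intro content _
  unfold Spec_extract_block_equations extract_block_equations extract_block_equations_alt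
  exact (foldl_aStep_main _ _ (le_refl _) 1 0 [] []).trans (by simp)
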